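-- pv_equiv track=rewrite | github.com/hivellm/expert-neo4j | preprocess.py | transform_match_to_create
-- ===== SOURCE A (Python) =====
-- def transform_match_to_create(cypher: str) -> str:
--     """Transform a MATCH query into a CREATE query."""
--     cypher_upper = cypher.upper().strip()
--
--     if not cypher_upper.startswith('MATCH'):
--         return ""
--
--     # Extract the pattern part (everything after MATCH until RETURN/WITH/WHERE)
--     # Pattern: MATCH (n:Label {prop: value})-[r:REL]->(m:Label2) RETURN ...
--     # Transform to: CREATE (n:Label {prop: value})-[r:REL]->(m:Label2) RETURN ...
--
--     # Find where MATCH pattern ends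
--     pattern_end_keywords = ['RETURN', 'WITH', 'WHERE', 'SET', 'DELETE', 'CREATE', 'MERGE', 'UNWIND', 'CALL']
--     pattern_end_pos = len(cypher)
--
--     for keyword in pattern_end_keywords:
--         pos = cypher_upper.find(f' {keyword}', 5)  # Start after 'MATCH'
--         if pos != -1 and pos < pattern_end_pos:
--             pattern_end_pos = pos
--
--     # Extract pattern
--     pattern = cypher[5:pattern_end_pos].strip()  # Skip 'MATCH'
--
--     if not pattern:
--         return ""
--
--     # Get the rest of the query (RETURN, WITH, etc.)
--     rest = cypher[pattern_end_pos:].strip()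
--
--     # Create new query - replace MATCH with CREATE
--     create_query = f"CREATE {pattern}"
--
--     # If there's a RETURN clause, keep it; otherwise add RETURN *
--     if rest.upper().startswith('RETURN'):
--         create_query += f" {rest}"
--     elif rest.upper().startswith('WITH'):
--         # WITH clauses are usually for chaining, keep them
--         create_query += f" {rest}"
--     else:
--         # No RETURN, add one
--         create_query += " RETURN *"
--
--     return create_query
-- ===== SOURCE B (Python) =====
-- _CLAUSE_STARTS = (' RETURN', ' WITH', ' WHERE', ' SET', ' DELETE',
--                   ' CREATE', ' MERGE', ' UNWIND', ' CALL')
--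
--
-- def transform_match_to_create(cypher: str) -> str:
--     """Transform a MATCH query into a CREATE query."""
--     cypher_upper = cypher.upper().strip()
--
--     if not cypher_upper.startswith('MATCH'):
--         return ""
--
--     # One left-to-right scan: the first position >= 5 where any clause
--     # keyword starts is where the MATCH pattern ends.
--     pattern_end_pos = len(cypher)
--     for i in range(5, len(cypher_upper)):
--         if cypher_upper.startswith(_CLAUSE_STARTS, i):
--             pattern_end_pos = i
--             break
--
--     pattern = cypher[5:pattern_end_pos].strip()
--     if not pattern:
--         return ""
--
--     rest = cypher[pattern_end_pos:].strip()
--     if rest.upper().startswith(('RETURN', 'WITH')):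
--         return f"CREATE {pattern} {rest}"
--     return f"CREATE {pattern} RETURN *"
-- ===== Notes on version B (the rewrite author's own statement) =====
-- stated objective: simpler
-- what changed: A computes pattern_end_pos as the minimum over nine separate cypher_upper.find(' KEYWORD', 5) passes; B makes one left-to-right scan from offset 5 and stops at the first position where str.startswith matches any keyword of the tuple, and it merges the identical RETURN/WITH result branches into one check.
import Mathlib
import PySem

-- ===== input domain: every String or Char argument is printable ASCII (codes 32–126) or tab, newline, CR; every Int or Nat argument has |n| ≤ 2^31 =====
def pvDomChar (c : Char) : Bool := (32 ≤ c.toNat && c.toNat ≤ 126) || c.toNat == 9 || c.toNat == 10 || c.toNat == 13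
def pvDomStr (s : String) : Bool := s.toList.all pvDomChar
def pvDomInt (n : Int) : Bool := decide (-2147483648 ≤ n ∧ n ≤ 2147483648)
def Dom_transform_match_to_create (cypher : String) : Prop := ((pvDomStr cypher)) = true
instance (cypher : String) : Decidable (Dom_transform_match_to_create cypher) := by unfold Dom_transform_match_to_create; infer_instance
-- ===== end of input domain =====

-- B replaces A's nine-keyword minimum-of-finds loop by a single left-to-right scan that
-- stops at the first position where any clause keyword starts (objective: simpler, one pass).

-- ===== PORT A =====
def tmcKeywords : List (List Char) :=
  ["RETURN".toList, "WITH".toList, "WHERE".toList, "SET".toList, "DELETE".toList,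
   "CREATE".toList, "MERGE".toList, "UNWIND".toList, "CALL".toList]

def transform_match_to_create (cypher : String) : String :=
  let cs := cypher.toList
  let cypher_upper := PySem.Chars.strip (PySem.Chars.upper cs)
  if !PySem.Chars.startswith cypher_upper "MATCH".toList then "" else
  let pattern_end_pos : Int :=
    tmcKeywords.foldl (fun p kw =>
      let pos := PySem.Chars.findFrom cypher_upper (' ' :: kw) 5 none
      if pos ≠ -1 ∧ pos < p then pos else p) (PySem.Chars.len cs)
  let pattern := PySem.Chars.strip (PySem.Chars.slice cs (some 5) (some pattern_end_pos))
  if pattern = [] then "" else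
  let rest := PySem.Chars.strip (PySem.Chars.slice cs (some pattern_end_pos) none)
  let create_query := "CREATE ".toList ++ pattern
  let create_query :=
    if PySem.Chars.startswith (PySem.Chars.upper rest) "RETURN".toList then
      create_query ++ ' ' :: rest
    else if PySem.Chars.startswith (PySem.Chars.upper rest) "WITH".toList then
      create_query ++ ' ' :: rest
    else
      create_query ++ " RETURN *".toList
  String.ofList create_query

-- ===== PORT B =====
def tmcClauseStarts : List (List Char) :=
  [" RETURN".toList, " WITH".toList, " WHERE".toList, " SET".toList, " DELETE".toList,
   " CREATE".toList, " MERGE".toList, " UNWIND".toList, " CALL".toList]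

-- Source B's 'for i in range(5, len(cypher_upper)): if cypher_upper.startswith(_CLAUSE_STARTS, i): break'
def tmcScan (dflt : Int) : Nat → List Char → Int
  | _, [] => dflt
  | i, c :: rest =>
    if tmcClauseStarts.any (fun kw => PySem.Chars.startswith (c :: rest) kw) then (i : Int)
    else tmcScan dflt (i + 1) rest

def transform_match_to_create_alt (cypher : String) : String :=
  let cs := cypher.toList
  let cypher_upper := PySem.Chars.strip (PySem.Chars.upper cs)
  if !PySem.Chars.startswith cypher_upper "MATCH".toList then "" else
  let pattern_end_pos : Int := tmcScan (PySem.Chars.len cs) 5 (cypher_upper.drop 5)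
  let pattern := PySem.Chars.strip (PySem.Chars.slice cs (some 5) (some pattern_end_pos))
  if pattern = [] then "" else
  let rest := PySem.Chars.strip (PySem.Chars.slice cs (some pattern_end_pos) none)
  if PySem.Chars.startswith (PySem.Chars.upper rest) "RETURN".toList
      || PySem.Chars.startswith (PySem.Chars.upper rest) "WITH".toList then
    String.ofList ("CREATE ".toList ++ pattern ++ ' ' :: rest)
  else
    String.ofList ("CREATE ".toList ++ pattern ++ " RETURN *".toList)

-- ===== PRECONDITION & SPEC =====
def Spec_transform_match_to_create (cypher : String) (out : String) : Prop := out = transform_match_to_create_alt cypher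
instance (cypher : String) (out : String) : Decidable (Spec_transform_match_to_create cypher out) := by unfold Spec_transform_match_to_create; infer_instance

-- ===== CLAIM (what is proved, stated in full; the proofs are below) =====
def Claim_equal_transform_match_to_create : Prop := ∀ (cypher : String), Dom_transform_match_to_create cypher → Spec_transform_match_to_create cypher (transform_match_to_create cypher)

-- ===== LEMMAS AND PROOFS =====

-- some clause keyword (with its leading space) starts at position i of u
def TmcHit (u : List Char) (i : Nat) : Prop := ∃ kw ∈ tmcClauseStarts, kw <+: u.drop i

lemma tmcClauseStarts_eq : tmcClauseStarts = tmcKeywords.map (fun kw => ' ' :: kw) := by decide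

lemma tmcClauseStarts_ne_nil : ∀ kw ∈ tmcClauseStarts, kw ≠ [] := by decide

lemma infix_iff_drop {α : Type} {l s : List α} : l <:+: s ↔ ∃ i, l <+: s.drop i := by
  constructor
  · rintro ⟨pre, suf, rfl⟩
    exact ⟨pre.length, by simp⟩
  · rintro ⟨i, h⟩
    exact h.isInfix.trans (s.drop_suffix i).isInfix

lemma tmcHit_lt_length {u : List Char} {i : Nat} (h : TmcHit u i) : i < u.length := by
  obtain ⟨kw, hkw, hpre⟩ := h
  by_contra hge
  rw [List.drop_eq_nil_of_le (by omega)] at hpre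
  exact tmcClauseStarts_ne_nil kw hkw (List.prefix_nil.mp hpre)

lemma tmcScan_no (u : List Char) (d : Int) :
    ∀ (t : List Char) (i : Nat), t = u.drop i → (∀ j, i ≤ j → ¬ TmcHit u j) →
      tmcScan d i t = d := by
  intro t
  induction t with
  | nil => intro i _ _; rfl
  | cons c rest ih =>
    intro i ht hno
    have hany : tmcClauseStarts.any (fun kw => PySem.Chars.startswith (c :: rest) kw) = false := by
      rw [List.any_eq_false]
      intro kw hkw
      simp only [PySem.Chars.startswith_iff]
      exact fun hsw => hno i le_rfl ⟨kw, hkw, ht ▸ hsw⟩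
    rw [tmcScan, hany]
    simp only [Bool.false_eq_true, if_false]
    refine ih (i + 1) ?_ (fun j hj => hno j (by omega))
    have hdd : u.drop (i + 1) = (u.drop i).drop 1 := List.drop_drop.symm
    rw [hdd, ← ht]
    rfl

lemma tmcScan_hit (u : List Char) (d : Int) (m : Nat) (hm : TmcHit u m) :
    ∀ (t : List Char) (i : Nat), t = u.drop i → i ≤ m →
      (∀ j, i ≤ j → j < m → ¬ TmcHit u j) →
      tmcScan d i t = (m : Int) := by
  intro t
  induction t with
  | nil =>
    intro i ht him _
    exfalso
    have hlen : u.length ≤ i := by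
      by_contra hlt
      have hne : u.drop i ≠ [] := by
        simp only [ne_eq, List.drop_eq_nil_iff]
        omega
      exact hne ht.symm
    have := tmcHit_lt_length hm
    omega
  | cons c rest ih =>
    intro i ht him hmin
    by_cases hi : TmcHit u i
    · have hie : i = m := by
        rcases Nat.lt_or_ge i m with hlt | _
        · exact absurd hi (hmin i le_rfl hlt)
        · omega
      subst hie
      obtain ⟨kw, hkw, hpre⟩ := hi
      have hany : tmcClauseStarts.any (fun kw => PySem.Chars.startswith (c :: rest) kw) = true := by
        rw [List.any_eq_true]
        exact ⟨kw, hkw, (PySem.Chars.startswith_iff _ _).mpr (ht ▸ hpre)⟩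
      rw [tmcScan, hany]
      simp
    · have hany : tmcClauseStarts.any (fun kw => PySem.Chars.startswith (c :: rest) kw) = false := by
        rw [List.any_eq_false]
        intro kw hkw
        simp only [PySem.Chars.startswith_iff]
        exact fun hsw => hi ⟨kw, hkw, ht ▸ hsw⟩
      rw [tmcScan, hany]
      simp only [Bool.false_eq_true, if_false]
      have hne : i ≠ m := fun h => hi (h ▸ hm)
      refine ih (i + 1) ?_ (by omega) (fun j hj hjm => hmin j (by omega) hjm)
      have hdd : u.drop (i + 1) = (u.drop i).drop 1 := List.drop_drop.symm
      rw [hdd, ← ht]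
      rfl

-- characterisation of A's minimum-of-finds fold, for a generic position function f
lemma foldmin_spec {α : Type} (f : α → Int) :
    ∀ (l : List α) (p : Int),
      (l.foldl (fun p kw => if f kw ≠ -1 ∧ f kw < p then f kw else p) p = p ∨
        ∃ kw ∈ l, f kw ≠ -1 ∧ l.foldl (fun p kw => if f kw ≠ -1 ∧ f kw < p then f kw else p) p = f kw) ∧
      l.foldl (fun p kw => if f kw ≠ -1 ∧ f kw < p then f kw else p) p ≤ p ∧
      (∀ kw ∈ l, f kw ≠ -1 → l.foldl (fun p kw => if f kw ≠ -1 ∧ f kw < p then f kw else p) p ≤ f kw) := by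
  intro l
  induction l with
  | nil => exact fun p => ⟨Or.inl rfl, le_rfl, by simp⟩
  | cons a l ih =>
    intro p
    simp only [List.foldl_cons]
    by_cases hc : f a ≠ -1 ∧ f a < p
    · rw [if_pos hc]
      obtain ⟨hor, hle, hall⟩ := ih (f a)
      refine ⟨?_, le_trans hle (le_of_lt hc.2), ?_⟩
      · rcases hor with h | ⟨kw, hkw, hne, heq⟩
        · exact Or.inr ⟨a, List.mem_cons_self, hc.1, h⟩
        · exact Or.inr ⟨kw, List.mem_cons_of_mem _ hkw, hne, heq⟩
      · intro kw hkw hne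
        rcases List.mem_cons.mp hkw with rfl | hmem
        · exact hle
        · exact hall kw hmem hne
    · rw [if_neg hc]
      obtain ⟨hor, hle, hall⟩ := ih p
      refine ⟨?_, hle, ?_⟩
      · rcases hor with h | ⟨kw, hkw, hne, heq⟩
        · exact Or.inl h
        · exact Or.inr ⟨kw, List.mem_cons_of_mem _ hkw, hne, heq⟩
      · intro kw hkw hne
        rcases List.mem_cons.mp hkw with rfl | hmem
        · push_neg at hc
          exact le_trans hle (hc hne)
        · exact hall kw hmem hne

lemma foldmin_all_neg {α : Type} (f : α → Int) :
    ∀ (l : List α) (p : Int), (∀ kw ∈ l, f kw = -1) →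
      l.foldl (fun p kw => if f kw ≠ -1 ∧ f kw < p then f kw else p) p = p := by
  intro l
  induction l with
  | nil => intro p _; rfl
  | cons a l ih =>
    intro p h
    simp only [List.foldl_cons]
    rw [if_neg (by simp [h a List.mem_cons_self])]
    exact ih p (fun kw hkw => h kw (List.mem_cons_of_mem _ hkw))

-- B's scan equals A's fold when the default d is at least the length of the scanned string
lemma pend_eq (u : List Char) (d : Int) (h5 : 5 ≤ u.length) (hd : (u.length : Int) ≤ d) :
    tmcScan d 5 (u.drop 5) =
      tmcKeywords.foldl (fun p kw =>
        let pos := PySem.Chars.findFrom u (' ' :: kw) 5 none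
        if pos ≠ -1 ∧ pos < p then pos else p) d := by
  have h5' : (5 : Int) = ((5 : Nat) : Int) := rfl
  set f : List Char → Int := fun kw => PySem.Chars.findFrom u (' ' :: kw) 5 none with hf
  set r := tmcKeywords.foldl (fun p kw => if f kw ≠ -1 ∧ f kw < p then f kw else p) d with hr
  have hfold := foldmin_spec f tmcKeywords d
  rw [← hr] at hfold
  have hf_neg : ∀ kw, f kw = -1 ↔ ¬ ∃ i, 5 ≤ i ∧ (' ' :: kw) <+: u.drop i := by
    intro kw
    rw [hf]
    simp only []
    rw [h5', PySem.Chars.findFrom_natCast_eq_neg_one_iff u (' ' :: kw) 5 h5, infix_iff_drop]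
    constructor
    · rintro h ⟨i, hi5, hpre⟩
      refine h ⟨i - 5, ?_⟩
      rw [List.drop_drop]
      convert hpre using 2
      omega
    · rintro h ⟨j, hpre⟩
      rw [List.drop_drop] at hpre
      exact h ⟨5 + j, by omega, hpre⟩
  have hf_spec : ∀ kw, f kw ≠ -1 →
      (5 : Int) ≤ f kw ∧ (' ' :: kw) <+: u.drop (f kw).toNat ∧
      ∀ i, 5 ≤ i → i < (f kw).toNat → ¬ (' ' :: kw) <+: u.drop i := by
    intro kw hne
    have hsp := PySem.Chars.findFrom_natCast_spec u (' ' :: kw) 5 h5 (by rw [← h5']; exact hne)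
    rw [← h5'] at hsp
    exact hsp
  by_cases hex : ∃ i, 5 ≤ i ∧ TmcHit u i
  · -- some keyword occurs: both sides are the least such position
    haveI : DecidablePred (fun i => 5 ≤ i ∧ TmcHit u i) := fun i => Classical.dec _
    obtain ⟨hm5, hmhit⟩ := Nat.find_spec hex
    set m := Nat.find hex with hm
    have hmin : ∀ j, 5 ≤ j → j < m → ¬ TmcHit u j := fun j hj5 hjm hhit =>
      Nat.find_min hex hjm ⟨hj5, hhit⟩
    have hmlen : m < u.length := tmcHit_lt_length hmhit
    rw [tmcScan_hit u d m hmhit (u.drop 5) 5 rfl hm5 hmin]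
    obtain ⟨kw', hkw', hpre'⟩ := hmhit
    obtain ⟨kw, hkwmem, rfl⟩ := by
      rw [tmcClauseStarts_eq, List.mem_map] at hkw'
      exact hkw'
    have hfne : f kw ≠ -1 := by
      rw [Ne, hf_neg]
      exact fun h => h ⟨m, hm5, hpre'⟩
    obtain ⟨hge5, hpref, hfmin⟩ := hf_spec kw hfne
    have htn : (f kw).toNat = m := by
      have hle : (f kw).toNat ≤ m := by
        by_contra hgt
        exact hfmin m hm5 (by omega) hpre'
      have hge : m ≤ (f kw).toNat := by
        rcases Nat.lt_or_ge (f kw).toNat m with hlt | h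
        · exfalso
          refine hmin (f kw).toNat (by omega) hlt ⟨' ' :: kw, ?_, hpref⟩
          rw [tmcClauseStarts_eq]
          exact List.mem_map.mpr ⟨kw, hkwmem, rfl⟩
        · exact h
      omega
    have hfkm : f kw = (m : Int) := by
      rw [← htn, Int.toNat_of_nonneg (by omega)]
    have hallge : ∀ kw1 ∈ tmcKeywords, f kw1 ≠ -1 → (m : Int) ≤ f kw1 := by
      intro kw1 hkw1 hne1
      obtain ⟨hge5', hpref', _⟩ := hf_spec kw1 hne1
      have hhit1 : TmcHit u (f kw1).toNat := by
        refine ⟨' ' :: kw1, ?_, hpref'⟩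
        rw [tmcClauseStarts_eq]
        exact List.mem_map.mpr ⟨kw1, hkw1, rfl⟩
      have hmle : m ≤ (f kw1).toNat := Nat.find_le ⟨by omega, hhit1⟩
      omega
    obtain ⟨hor, hle, hall⟩ := hfold
    have hrm : r ≤ (m : Int) := hfkm ▸ hall kw hkwmem hfne
    rcases hor with hrd | ⟨kw1, hkw1, hne1, hreq⟩
    · exfalso
      rw [hrd] at hrm
      have hml : (m : Int) < (u.length : Int) := by exact_mod_cast hmlen
      omega
    · have := hallge kw1 hkw1 hne1
      rw [hreq]
      omega
  · -- no keyword occurs: both sides are d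
    push_neg at hex
    rw [tmcScan_no u d (u.drop 5) 5 rfl (fun j hj hhit => hex j hj hhit)]
    have hallneg : ∀ kw ∈ tmcKeywords, f kw = -1 := by
      intro kw hkw
      rw [hf_neg]
      rintro ⟨i, hi5, hpre⟩
      refine hex i hi5 ⟨' ' :: kw, ?_, hpre⟩
      rw [tmcClauseStarts_eq]
      exact List.mem_map.mpr ⟨kw, hkw, rfl⟩
    rw [hr, foldmin_all_neg f tmcKeywords d hallneg]

lemma strip_length_le (s : List Char) : (PySem.Chars.strip s).length ≤ s.length := by
  simp only [PySem.Chars.strip, PySem.Chars.rstrip, PySem.Chars.lstrip]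
  calc ((List.dropWhile PySem.Chars.isspace (List.dropWhile PySem.Chars.isspace s).reverse).reverse).length
      ≤ (List.dropWhile PySem.Chars.isspace s).reverse.length := by
        rw [List.length_reverse]
        exact List.length_dropWhile_le _ _
    _ ≤ s.length := by
        rw [List.length_reverse]
        exact List.length_dropWhile_le _ _

-- ===== VERDICT (by name: the statement is the Claim_ definition above) =====
theorem transform_match_to_create_spec : Claim_equal_transform_match_to_create := by
  intro cypher _
  unfold Spec_transform_match_to_create transform_match_to_create transform_match_to_create_alt
  simp only []
  set cs := cypher.toList with hcs
  set u := PySem.Chars.strip (PySem.Chars.upper cs) with hu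
  by_cases hsw : PySem.Chars.startswith u "MATCH".toList
  · rw [hsw]
    simp only [Bool.not_true, Bool.false_eq_true, if_false]
    have h5 : 5 ≤ u.length := by
      have hpre := (PySem.Chars.startswith_iff u "MATCH".toList).mp hsw
      have := hpre.length_le
      simpa using this
    have hd : (u.length : Int) ≤ PySem.Chars.len cs := by
      rw [PySem.Chars.len_eq]
      have h1 : u.length ≤ (PySem.Chars.upper cs).length := strip_length_le _
      have h2 : (PySem.Chars.upper cs).length = cs.length := by
        simp [PySem.Chars.upper]
      omega
    rw [← pend_eq u (PySem.Chars.len cs) h5 hd]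
    set pend := tmcScan (PySem.Chars.len cs) 5 (u.drop 5) with hpend
    set pattern := PySem.Chars.strip (PySem.Chars.slice cs (some 5) (some pend)) with hpat
    by_cases hp : pattern = []
    · rw [if_pos hp, if_pos hp]
    · rw [if_neg hp, if_neg hp]
      split_ifs <;> simp_all
  · rw [Bool.eq_false_iff.mpr hsw]
    simp
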